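-- pv_equiv track=rewrite | github.com/adriandecola/cs_109 | labs/lab8.py | findMinString
-- ===== SOURCE A (Python) =====
-- def findMinString(listOfStrings):
--     index = None
--     length = None
--     for i in range(len(listOfStrings)):
--         currentString = listOfStrings[i]
--         if index == None or len(currentString) < length:
--             index = i
--             length = len(currentString)
--     return index
-- ===== SOURCE B (Python) =====
-- def findMinString(listOfStrings):
--     if not listOfStrings:
--         return None
--     lengths = [len(s) for s in listOfStrings]
--     return lengths.index(min(lengths))
-- ===== Notes on version B (the rewrite author's own statement) =====
-- stated objective: simpler
-- what changed: Replaces A's fused best-index/best-length tracking loop over range(len) with a materialized lengths table, a separate min() scan and an .index() lookup (first-tie semantics match A's strict-improvement rule).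
import Mathlib
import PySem

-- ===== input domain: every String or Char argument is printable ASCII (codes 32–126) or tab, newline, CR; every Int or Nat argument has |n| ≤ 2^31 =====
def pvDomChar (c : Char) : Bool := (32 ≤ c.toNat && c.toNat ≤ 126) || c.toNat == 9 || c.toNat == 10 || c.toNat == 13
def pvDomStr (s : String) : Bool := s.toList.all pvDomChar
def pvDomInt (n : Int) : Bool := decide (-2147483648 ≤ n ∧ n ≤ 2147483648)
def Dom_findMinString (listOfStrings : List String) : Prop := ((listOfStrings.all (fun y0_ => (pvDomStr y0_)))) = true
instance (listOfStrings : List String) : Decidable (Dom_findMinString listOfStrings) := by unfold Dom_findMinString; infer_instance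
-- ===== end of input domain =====

-- B replaces A's fused best-tracking loop with a lengths table + separate min scan + first-index lookup (simpler decomposition).

-- ===== PORT A =====
-- A's for-loop over range(len(listOfStrings)) with the two mutable variables
-- index, length (both starting as None), as a structural recursion carrying i and both.
def findMinStringLoop (xs : List String) (i : Int) (index : Option Int) (length : Option Int) : Option Int :=
  match xs with
  | [] => index
  | currentString :: rest =>
    -- 'index == None or len(currentString) < length' (short-circuit: length is read only when index ≠ None)
    if index.isNone || (match length with
                        | some l => decide (PySem.Str.len currentString < l)
                        | none => false) then
      findMinStringLoop rest (i + 1) (some i) (some (PySem.Str.len currentString))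
    else
      findMinStringLoop rest (i + 1) index length

def findMinString (listOfStrings : List String) : Option Int :=
  findMinStringLoop listOfStrings 0 none none

-- ===== PORT B =====
def findMinString_alt (listOfStrings : List String) : Option Int :=
  if listOfStrings = [] then none
  else
    match PySem.List.min? (listOfStrings.map PySem.Str.len) (fun x => x) with
    | none => none
    | some m => (PySem.List.index? (listOfStrings.map PySem.Str.len) m).map (fun k => (k : Int))

-- ===== PRECONDITION & SPEC =====
def Spec_findMinString (listOfStrings : List String) (out : Option Int) : Prop := out = findMinString_alt listOfStrings
instance (listOfStrings : List String) (out : Option Int) : Decidable (Spec_findMinString listOfStrings out) := by unfold Spec_findMinString; infer_instance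

-- ===== CLAIM (what is proved, stated in full; the proofs are below) =====
def Claim_equal_findMinString : Prop := ∀ (listOfStrings : List String), Dom_findMinString listOfStrings → Spec_findMinString listOfStrings (findMinString listOfStrings)

-- ===== LEMMAS AND PROOFS =====

-- reference: (first index of the minimum, minimum value)
def miSpec : List Int → Option (Nat × Int)
  | [] => none
  | l :: ls =>
    match miSpec ls with
    | none => some (0, l)
    | some (j, m) => if l ≤ m then some (0, l) else some (j + 1, m)

theorem miSpec_eq_none_iff (ls : List Int) : miSpec ls = none ↔ ls = [] := by
  cases ls with
  | nil => simp [miSpec]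
  | cons l t =>
    simp only [miSpec]
    cases h : miSpec t with
    | none => simp
    | some p => obtain ⟨j, m⟩ := p; by_cases hlm : l ≤ m <;> simp [hlm]

theorem miSpec_min (ls : List Int) (j : Nat) (m : Int) (h : miSpec ls = some (j, m)) :
    m ∈ ls ∧ ∀ y ∈ ls, m ≤ y := by
  induction ls generalizing j m with
  | nil => simp [miSpec] at h
  | cons l t ih =>
    simp only [miSpec] at h
    cases ht : miSpec t with
    | none =>
      have : t = [] := (miSpec_eq_none_iff t).mp ht
      subst this
      rw [ht] at h
      simp at h
      obtain ⟨_, hm⟩ := h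
      subst hm; simp
    | some p =>
      obtain ⟨j', m'⟩ := p
      rw [ht] at h
      obtain ⟨hm'mem, hm'min⟩ := ih j' m' ht
      by_cases hlm : l ≤ m'
      · simp [hlm] at h
        obtain ⟨_, hm⟩ := h
        subst hm
        refine ⟨by simp, ?_⟩
        intro y hy
        rcases List.mem_cons.mp hy with h1 | h2
        · omega
        · exact le_trans hlm (hm'min y h2)
      · simp [hlm] at h
        obtain ⟨_, hm⟩ := h
        subst hm
        refine ⟨List.mem_cons_of_mem _ hm'mem, ?_⟩
        intro y hy
        rcases List.mem_cons.mp hy with h1 | h2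
        · omega
        · exact hm'min y h2

theorem miSpec_index (ls : List Int) (j : Nat) (m : Int) (h : miSpec ls = some (j, m)) :
    PySem.List.index? ls m = some j := by
  induction ls generalizing j m with
  | nil => simp [miSpec] at h
  | cons l t ih =>
    simp only [miSpec] at h
    cases ht : miSpec t with
    | none =>
      rw [ht] at h
      simp at h
      obtain ⟨hj, hm⟩ := h
      subst hj; subst hm
      exact PySem.List.index?_cons_self l t
    | some p =>
      obtain ⟨j', m'⟩ := p
      rw [ht] at h
      by_cases hlm : l ≤ m'
      · simp [hlm] at h
        obtain ⟨hj, hm⟩ := h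
        subst hj; subst hm
        exact PySem.List.index?_cons_self l t
      · simp [hlm] at h
        obtain ⟨hj, hm⟩ := h
        subst hj; subst hm
        have hne : l ≠ m' := by omega
        rw [PySem.List.index?_cons_of_ne _ hne, ih j' m' ht]
        rfl

-- B computes miSpec's first component
theorem alt_eq_miSpec (xs : List String) (j : Nat) (m : Int)
    (h : miSpec (xs.map PySem.Str.len) = some (j, m)) :
    findMinString_alt xs = some (j : Int) := by
  have hne : xs ≠ [] := by
    intro hx; subst hx; simp [miSpec] at h
  obtain ⟨hmem, hmin⟩ := miSpec_min _ _ _ h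
  unfold findMinString_alt
  rw [if_neg hne]
  cases hm' : PySem.List.min? (xs.map PySem.Str.len) (fun x => x) with
  | none =>
    rw [PySem.List.min?_eq_none_iff] at hm'
    simp [hm'] at hmem
  | some v =>
    have hvmem := PySem.List.min?_mem hm'
    have hvmin := PySem.List.min?_isMin hm'
    have hvm : v = m := le_antisymm (hvmin m hmem) (hmin v hvmem)
    subst hvm
    have hidx := miSpec_index _ _ _ h
    rw [PySem.List.index?_eq_idxOf?] at hidx
    simp [hidx]

-- A's loop from a committed state (some bi, some bl)
theorem loop_some (xs : List String) (i bi bl : Int) :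
    findMinStringLoop xs i (some bi) (some bl) =
      some (match miSpec (xs.map PySem.Str.len) with
            | none => bi
            | some (j, m) => if m < bl then i + (j : Int) else bi) := by
  induction xs generalizing i bi bl with
  | nil => simp [findMinStringLoop, miSpec]
  | cons s rest ih =>
    have hlen : PySem.Str.len s = (s.length : Int) := PySem.Str.len_eq s
    by_cases hcmp : (s.length : Int) < bl
    · rw [show findMinStringLoop (s :: rest) i (some bi) (some bl) =
          findMinStringLoop rest (i + 1) (some i) (some (PySem.Str.len s)) by
        simp [findMinStringLoop, hlen, hcmp]]
      rw [hlen, ih]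
      cases ht : miSpec (rest.map PySem.Str.len) with
      | none => simp [miSpec, ht, hlen, hcmp]
      | some p =>
        obtain ⟨j, m⟩ := p
        by_cases hlm : (s.length : Int) ≤ m
        · have h1 : ¬ m < (s.length : Int) := by omega
          simp [miSpec, ht, hlen, hlm, h1, hcmp]
        · have h1 : m < (s.length : Int) := by omega
          have h2 : m < bl := by omega
          simp [miSpec, ht, hlen, hlm, h1, h2]
          push_cast
          ring
    · rw [show findMinStringLoop (s :: rest) i (some bi) (some bl) =
          findMinStringLoop rest (i + 1) (some bi) (some bl) by
        simp [findMinStringLoop, hlen, hcmp]]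
      rw [ih]
      cases ht : miSpec (rest.map PySem.Str.len) with
      | none => simp [miSpec, ht, hlen, hcmp]
      | some p =>
        obtain ⟨j, m⟩ := p
        by_cases hlm : (s.length : Int) ≤ m
        · have h1 : ¬ m < bl := by omega
          simp [miSpec, ht, hlen, hlm, hcmp, h1]
        · by_cases hmb : m < bl
          · simp [miSpec, ht, hlen, hlm, hmb]
            push_cast
            ring
          · simp [miSpec, ht, hlen, hlm, hmb]

theorem findMinString_eq_miSpec (xs : List String) :
    findMinString xs =
      (miSpec (xs.map PySem.Str.len)).map (fun p => (p.1 : Int)) := by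
  cases xs with
  | nil => simp [findMinString, findMinStringLoop, miSpec]
  | cons s rest =>
    have hlen : PySem.Str.len s = (s.length : Int) := PySem.Str.len_eq s
    rw [show findMinString (s :: rest) =
        findMinStringLoop rest 1 (some 0) (some (PySem.Str.len s)) by
      simp [findMinString, findMinStringLoop]]
    rw [hlen, loop_some]
    cases ht : miSpec (rest.map PySem.Str.len) with
    | none => simp [miSpec, ht, hlen]
    | some p =>
      obtain ⟨j, m⟩ := p
      by_cases hlm : (s.length : Int) ≤ m
      · have h1 : ¬ m < (s.length : Int) := by omega
        simp [miSpec, ht, hlen, hlm, h1]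
      · have h1 : m < (s.length : Int) := by omega
        simp [miSpec, ht, hlen, hlm, h1]
        push_cast
        ring

-- ===== VERDICT (by name: the statement is the Claim_ definition above) =====
theorem findMinString_spec : Claim_equal_findMinString := by
  intro xs _
  unfold Spec_findMinString
  rw [findMinString_eq_miSpec]
  cases h : miSpec (xs.map PySem.Str.len) with
  | none =>
    have hnil : xs = [] := by
      have := (miSpec_eq_none_iff _).mp h
      cases xs with
      | nil => rfl
      | cons a t => simp at this
    subst hnil
    simp [findMinString_alt]
  | some p =>
    obtain ⟨j, m⟩ := p
    rw [alt_eq_miSpec xs j m h]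
    rfl
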